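-- pv_equiv track=rewrite | github.com/vladimirkokshenev/Algorithms | scc.py | dfs2_loop
-- ===== SOURCE A (Python) =====
-- def dfs2(G, i, explored_nodes, scc_membership, leader, scc_size):
--     """
--     Second pass recursive DFS for computing SCC alg. Mark nodes according to SCC membership (using leader id).
--     And counts number of nodes in an SCC.
--     :param G: input graph G (as adjacency list)
--     :param i: current node number
--     :param explored_nodes: list of boolean numbers, where true is for explored nodes, and false is for unexplored.
--     :param scc_membership: leader id is used to represent scc membership
--     :param leader: leader node id (all nodes in this scc will be marked with leader id)
--     :param scc_size: current SCC size
--     :return: adjusted SCC size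
--     """
--
--     # mark i as explored
--     explored_nodes[i] = True
--     scc_size = scc_size + 1
--     scc_membership[i] = leader
--
--     # check all nodes adjacent with i
--     for j in G[i]:
--         if not explored_nodes[j]:
--             scc_size = dfs2(G, j, explored_nodes, scc_membership, leader, scc_size)
--
--     # return adjusted scc_size value, as it will be required in up-the-call-stack instances
--     return scc_size
--
-- def dfs2_loop(G, search_order):
--     """
--     DFS loop function for the second pass of an SCC alg. Colors SCCs, and calculate it's sizes
--     :param G: input graph G (as adjacency list)
--     :param search_order: list of node ids, established on the first pass of algorithm.
--     :return: list of SCC sizes, membership list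
--     """
--
--     n = len(G)
--
--     explored_nodes = [False for i in range(n)]
--     scc_membership = [-1 for i in range(n)]
--
--     scc_sizes = []
--
--     for i in search_order:
--         if not explored_nodes[i[0]]:
--             scc_size = 0
--             leader = i[0]
--             scc_size = dfs2(G, i[0], explored_nodes, scc_membership, leader, scc_size)
--             scc_sizes.append(scc_size)
--
--     return scc_sizes, scc_membership
-- ===== SOURCE B (Python) =====
-- def dfs2_loop(G, search_order):
--     """Iterative second-pass DFS: explicit stack instead of recursion (no recursion-depth limit)."""
--     n = len(G)
--     explored_nodes = [False] * n
--     scc_membership = [-1] * n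
--     scc_sizes = []
--     for i in search_order:
--         root = i[0]
--         if not explored_nodes[root]:
--             leader = root
--             size = 0
--             stack = [root]
--             while stack:
--                 v = stack.pop()
--                 if explored_nodes[v]:
--                     continue
--                 explored_nodes[v] = True
--                 scc_membership[v] = leader
--                 size += 1
--                 stack.extend(reversed(G[v]))
--             scc_sizes.append(size)
--     return scc_sizes, scc_membership
-- ===== Notes on version B (the rewrite author's own statement) =====
-- stated objective: alternative
-- what changed: Replaces the recursive second-pass DFS helper dfs2 with an explicit-stack iterative DFS (pop-time explored check, neighbors pushed in reverse), removing the recursion entirely.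
import Mathlib
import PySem

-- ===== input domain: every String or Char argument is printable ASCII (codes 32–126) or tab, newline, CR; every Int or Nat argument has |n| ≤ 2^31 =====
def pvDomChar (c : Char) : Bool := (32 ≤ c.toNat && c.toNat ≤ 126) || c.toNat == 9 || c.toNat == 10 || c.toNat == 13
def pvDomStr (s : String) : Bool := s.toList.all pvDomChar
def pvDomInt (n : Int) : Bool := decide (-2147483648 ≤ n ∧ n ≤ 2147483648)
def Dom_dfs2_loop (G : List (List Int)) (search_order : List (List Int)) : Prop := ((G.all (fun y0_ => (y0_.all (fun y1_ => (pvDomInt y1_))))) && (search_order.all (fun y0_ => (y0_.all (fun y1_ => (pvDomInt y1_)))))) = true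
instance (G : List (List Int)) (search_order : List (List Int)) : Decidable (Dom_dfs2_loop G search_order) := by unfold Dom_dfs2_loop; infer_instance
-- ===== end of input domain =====

-- B replaces A's recursive helper dfs2 with an explicit-stack iterative DFS (pop-time explored
-- check, neighbors pushed in reverse so the visit order matches); objective: alternative.
-- The Python functions mutate no caller-visible state; both build their own fresh lists.

-- Python list index resolution (negative indices count from the end), shared by both ports.
def pvNorm (n : Nat) (i : Int) : Int := if i < 0 then i + n else i

-- resolved index into the explored list
def pvIx (e : List Bool) (i : Int) : Nat := (pvNorm e.length i).toNat

-- `i is a valid index into e and explored[i] is False` — the guard both Pythons test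
-- (on an invalid index Python raises IndexError; such inputs are outside Pre_).
def pvOk (e : List Bool) (i : Int) : Bool :=
  (decide (0 ≤ pvNorm e.length i) && decide (pvNorm e.length i < (e.length : Int)))
    && !(e.getD (pvIx e i) true)

theorem pvOk_lt {e : List Bool} {i : Int} (h : pvOk e i = true) : pvIx e i < e.length := by
  simp [pvOk] at h
  simp [pvIx]
  omega

theorem pvOk_getD {e : List Bool} {i : Int} (h : pvOk e i = true) :
    e.getD (pvIx e i) true = false := by
  simp [pvOk] at h
  simpa using h.2

-- number of `false` entries (unexplored nodes); termination measure for port B (cited by name there)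
def pvFc (e : List Bool) : Nat := e.countP (fun b => !b)

theorem pvFc_set_lt (e : List Bool) (k : Nat) (hk : k < e.length)
    (hg : e.getD k true = false) : pvFc (e.set k true) < pvFc e := by
  induction e generalizing k with
  | nil => simp at hk
  | cons b t ih =>
    cases k with
    | zero =>
      simp [List.getD] at hg
      subst hg
      simp [pvFc]
    | succ k =>
      simp at hk
      simp [List.getD] at hg
      have := ih k hk (by simpa [List.getD] using hg)
      simp [pvFc, List.countP_cons] at *
      omega

-- ===== PORT A =====
-- A's recursive dfs2, with the (always-present) call-site guard `if not explored_nodes[i]`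
-- folded into the entry; fuel makes the recursion structural — `G.length + 1` fuel is always
-- enough (each recursion level marks a fresh node), so the fuel-0 branch is never reached.
def visitA (G : List (List Int)) (L : Int) : Nat → Int → List Bool → List Int → Int → List Bool × List Int × Int
  | 0, _, e, m, sz => (e, m, sz)
  | f+1, i, e, m, sz =>
    if pvOk e i then
      -- explored_nodes[i] = True; scc_size += 1; scc_membership[i] = leader; then the neighbor loop
      (G.getD (pvIx e i) []).foldl (fun st j => visitA G L f j st.1 st.2.1 st.2.2)
        (e.set (pvIx e i) true, m.set (pvIx e i) L, sz + 1)
    else (e, m, sz)   -- already explored: the call-site guard skips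

-- body of A's `for i in search_order` loop
def loopStepA (G : List (List Int)) (acc : List Int × List Bool × List Int) (i : List Int) :
    List Int × List Bool × List Int :=
  match i with
  | [] => acc    -- Python raises IndexError on i[0]; outside Pre_
  | r :: _ =>
    if pvOk acc.2.1 r then
      let res := visitA G r (G.length + 1) r acc.2.1 acc.2.2 0
      (acc.1 ++ [res.2.2], res.1, res.2.1)
    else acc

def dfs2_loop (G : List (List Int)) (search_order : List (List Int)) : List Int × List Int :=
  let r := search_order.foldl (loopStepA G)
    ([], List.replicate G.length false, List.replicate G.length (-1 : Int))
  (r.1, r.2.2)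

-- ===== PORT B =====
-- B's `while stack:` loop; the Lean list holds the stack top first, so Python's
-- `stack.extend(reversed(G[v]))` becomes prepending `G[v]` to the stack.
def dfsB (G : List (List Int)) (L : Int) (e : List Bool) (m : List Int) (sz : Int)
    (stack : List Int) : List Bool × List Int × Int :=
  match stack with
  | [] => (e, m, sz)
  | v :: s =>
    if h : pvOk e v then
      dfsB G L (e.set (pvIx e v) true) (m.set (pvIx e v) L) (sz + 1) (G.getD (pvIx e v) [] ++ s)
    else
      dfsB G L e m sz s   -- already explored: continue
termination_by (pvFc e, stack.length)
decreasing_by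
  · exact Prod.Lex.left _ _ (pvFc_set_lt e (pvIx e v) (pvOk_lt h) (pvOk_getD h))
  · exact Prod.Lex.right _ (by simp)

-- body of B's `for i in search_order` loop
def loopStepB (G : List (List Int)) (acc : List Int × List Bool × List Int) (i : List Int) :
    List Int × List Bool × List Int :=
  match i with
  | [] => acc    -- Python raises IndexError on i[0]; outside Pre_
  | r :: _ =>
    if pvOk acc.2.1 r then
      let res := dfsB G r acc.2.1 acc.2.2 0 [r]
      (acc.1 ++ [res.2.2], res.1, res.2.1)
    else acc

def dfs2_loop_alt (G : List (List Int)) (search_order : List (List Int)) : List Int × List Int :=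
  let r := search_order.foldl (loopStepB G)
    ([], List.replicate G.length false, List.replicate G.length (-1 : Int))
  (r.1, r.2.2)

-- ===== PRECONDITION & SPEC =====
-- `j` is a valid index into a list of length n (after Python's negative-index resolution)
def pvInR (n : Nat) (j : Int) : Bool := decide (0 ≤ pvNorm n j) && decide (pvNorm n j < (n : Int))

-- the (resolved) valid roots i[0] of search_order
def pvRoots (G : List (List Int)) (search_order : List (List Int)) : List Nat :=
  search_order.filterMap (fun l => match l.head? with
    | some r => if pvInR G.length r then some (pvNorm G.length r).toNat else none
    | none => none)

-- one expansion step of the set of nodes reachable from the roots along in-range edges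
def pvStep (G : List (List Int)) (S : List Nat) : List Nat :=
  (S ++ S.flatMap (fun v => (G.getD v []).filterMap
    (fun j => if pvInR G.length j then some (pvNorm G.length j).toNat else none))).dedup

-- all nodes reachable from the roots along in-range edges (fixpoint is reached within |G| steps)
def pvClosure (G : List (List Int)) (search_order : List (List Int)) : List Nat :=
  (pvStep G)^[G.length] (pvRoots G search_order).dedup

-- Pre_ excludes exactly the inputs where the Python raises IndexError: an empty inner list in
-- search_order (i[0]), a root index out of range, or an out-of-range entry in the adjacency row
-- of a node the traversal visits (= reachable from the roots along in-range edges).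
def Pre_dfs2_loop (G : List (List Int)) (search_order : List (List Int)) : Prop :=
  (∀ l ∈ search_order, l ≠ [] ∧ pvInR G.length (l.headD 0) = true) ∧
  (∀ v ∈ pvClosure G search_order, ∀ j ∈ G.getD v [], pvInR G.length j = true)
instance (G : List (List Int)) (search_order : List (List Int)) : Decidable (Pre_dfs2_loop G search_order) := by unfold Pre_dfs2_loop; infer_instance

def pvWitness_dfs2_loop : List (List Int) × List (List Int) := ([[1], [0], []], [[2], [0], [1]])

def Spec_dfs2_loop (G : List (List Int)) (search_order : List (List Int)) (out : List Int × List Int) : Prop := out = dfs2_loop_alt G search_order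
instance (G : List (List Int)) (search_order : List (List Int)) (out : List Int × List Int) : Decidable (Spec_dfs2_loop G search_order out) := by unfold Spec_dfs2_loop; infer_instance

-- ===== CLAIM (what is proved, stated in full; the proofs are below) =====
def Claim_equal_dfs2_loop : Prop := ∀ (G : List (List Int)) (search_order : List (List Int)), Dom_dfs2_loop G search_order → Pre_dfs2_loop G search_order → Spec_dfs2_loop G search_order (dfs2_loop G search_order)

-- ===== LEMMAS AND PROOFS =====

theorem pvFc_le_length (e : List Bool) : pvFc e ≤ e.length := List.countP_le_length

-- visitA preserves the length of `explored` and never decreases the number of explored nodes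
theorem visitA_pres (G : List (List Int)) (L : Int) :
    ∀ (f : Nat) (i : Int) (e : List Bool) (m : List Int) (sz : Int),
      (visitA G L f i e m sz).1.length = e.length ∧ pvFc (visitA G L f i e m sz).1 ≤ pvFc e := by
  intro f
  induction f with
  | zero => intro i e m sz; simp [visitA]
  | succ f ih =>
    intro i e m sz
    simp only [visitA]
    split
    · rename_i h
      have hfold : ∀ (l : List Int) (st : List Bool × List Int × Int),
          (l.foldl (fun st j => visitA G L f j st.1 st.2.1 st.2.2) st).1.length = st.1.length ∧
          pvFc (l.foldl (fun st j => visitA G L f j st.1 st.2.1 st.2.2) st).1 ≤ pvFc st.1 := by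
        intro l
        induction l with
        | nil => intro st; simp
        | cons j t iht =>
          intro st
          simp only [List.foldl_cons]
          have h1 := ih j st.1 st.2.1 st.2.2
          have h2 := iht (visitA G L f j st.1 st.2.1 st.2.2)
          exact ⟨by rw [h2.1, h1.1], le_trans h2.2 h1.2⟩
      have hlt := pvFc_set_lt e (pvIx e i) (pvOk_lt h) (pvOk_getD h)
      have hf := hfold (G.getD (pvIx e i) [])
        (e.set (pvIx e i) true, m.set (pvIx e i) L, sz + 1)
      exact ⟨by rw [hf.1]; simp, le_trans hf.2 (by simpa using Nat.le_of_lt hlt)⟩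
    · simp

-- the fuel argument is irrelevant once it exceeds the number of unexplored nodes
theorem visitA_fuel (G : List (List Int)) (L : Int) :
    ∀ (f1 f2 : Nat) (i : Int) (e : List Bool) (m : List Int) (sz : Int),
      pvFc e < f1 → pvFc e < f2 → visitA G L f1 i e m sz = visitA G L f2 i e m sz := by
  intro f1
  induction f1 with
  | zero => intro f2 i e m sz h1; omega
  | succ f1 ih =>
    intro f2 i e m sz h1 h2
    obtain ⟨f2', rfl⟩ : ∃ f2', f2 = f2' + 1 := ⟨f2 - 1, by omega⟩
    simp only [visitA]
    split
    · rename_i h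
      have hlt := pvFc_set_lt e (pvIx e i) (pvOk_lt h) (pvOk_getD h)
      have hfold : ∀ (l : List Int) (st : List Bool × List Int × Int),
          pvFc st.1 < f1 → pvFc st.1 < f2' →
          l.foldl (fun st j => visitA G L f1 j st.1 st.2.1 st.2.2) st =
          l.foldl (fun st j => visitA G L f2' j st.1 st.2.1 st.2.2) st := by
        intro l
        induction l with
        | nil => intro st _ _; rfl
        | cons j t iht =>
          intro st hs1 hs2
          simp only [List.foldl_cons]
          rw [ih f2' j st.1 st.2.1 st.2.2 hs1 hs2]
          apply iht
          · calc pvFc (visitA G L f2' j st.1 st.2.1 st.2.2).1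
                ≤ pvFc st.1 := by
                  rw [← ih f2' j st.1 st.2.1 st.2.2 hs1 hs2]
                  exact (visitA_pres G L f1 j st.1 st.2.1 st.2.2).2
              _ < f1 := hs1
          · calc pvFc (visitA G L f2' j st.1 st.2.1 st.2.2).1
                ≤ pvFc st.1 := (visitA_pres G L f2' j st.1 st.2.1 st.2.2).2
              _ < f2' := hs2
      exact hfold _ _ (by simp; omega) (by simp; omega)
    · rfl

-- main simulation: the explicit-stack DFS equals folding the recursive visit over the stack
theorem dfsB_eq_fold (G : List (List Int)) (L : Int) :
    ∀ (e : List Bool) (m : List Int) (sz : Int) (stack : List Int) (f : Nat), pvFc e < f →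
      dfsB G L e m sz stack =
        stack.foldl (fun st v => visitA G L f v st.1 st.2.1 st.2.2) (e, m, sz) := by
  intro e m sz stack
  induction e, m, sz, stack using dfsB.induct G L with
  | case1 e m sz => intro f hf; simp [dfsB]
  | case2 e m sz v s h ih =>
    intro f hf
    obtain ⟨f', rfl⟩ : ∃ f', f = f' + 1 := ⟨f - 1, by omega⟩
    have hlt := pvFc_set_lt e (pvIx e v) (pvOk_lt h) (pvOk_getD h)
    rw [dfsB, dif_pos h]
    rw [ih (f' + 1) (by omega)]
    rw [List.foldl_append, List.foldl_cons]
    have hstep : visitA G L (f' + 1) v e m sz =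
        (G.getD (pvIx e v) []).foldl (fun st j => visitA G L f' j st.1 st.2.1 st.2.2)
          (e.set (pvIx e v) true, m.set (pvIx e v) L, sz + 1) := by
      simp only [visitA]
      rw [if_pos h]
    rw [hstep]
    congr 1
    have hfold : ∀ (l : List Int) (st : List Bool × List Int × Int),
        pvFc st.1 < f' →
        l.foldl (fun st j => visitA G L (f' + 1) j st.1 st.2.1 st.2.2) st =
        l.foldl (fun st j => visitA G L f' j st.1 st.2.1 st.2.2) st := by
      intro l
      induction l with
      | nil => intro st _; rfl
      | cons j t iht =>
        intro st hs
        simp only [List.foldl_cons]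
        rw [visitA_fuel G L (f' + 1) f' j st.1 st.2.1 st.2.2 (by omega) hs]
        apply iht
        calc pvFc (visitA G L f' j st.1 st.2.1 st.2.2).1
            ≤ pvFc st.1 := (visitA_pres G L f' j st.1 st.2.1 st.2.2).2
          _ < f' := hs
    exact (hfold (G.getD (pvIx e v) []) (e.set (pvIx e v) true, m.set (pvIx e v) L, sz + 1)
      (by show pvFc (e.set (pvIx e v) true) < f'; omega))
  | case3 e m sz v s h ih =>
    intro f hf
    obtain ⟨f', rfl⟩ : ∃ f', f = f' + 1 := ⟨f - 1, by omega⟩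
    rw [dfsB, dif_neg h]
    rw [ih (f' + 1) hf]
    rw [List.foldl_cons]
    have hstep : visitA G L (f' + 1) v e m sz = (e, m, sz) := by
      simp only [visitA]
      rw [if_neg h]
    rw [hstep]

-- one loop step: the two bodies agree and preserve the explored-list length
theorem step_eq (G : List (List Int)) (acc : List Int × List Bool × List Int) (i : List Int)
    (hlen : acc.2.1.length = G.length) :
    loopStepA G acc i = loopStepB G acc i ∧ (loopStepA G acc i).2.1.length = G.length := by
  obtain ⟨sizes, e, m⟩ := acc
  simp only at hlen
  cases i with
  | nil => exact ⟨rfl, hlen⟩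
  | cons r t =>
    simp only [loopStepA, loopStepB]
    split
    · have hfc : pvFc e < G.length + 1 := by
        have := pvFc_le_length e
        omega
      have hsim := dfsB_eq_fold G r e m 0 [r] (G.length + 1) hfc
      simp only [List.foldl_cons, List.foldl_nil] at hsim
      refine ⟨by rw [hsim], ?_⟩
      have := (visitA_pres G r (G.length + 1) r e m 0).1
      simp only [this, hlen]
    · exact ⟨rfl, hlen⟩

theorem loop_eq (G : List (List Int)) :
    ∀ (so : List (List Int)) (acc : List Int × List Bool × List Int), acc.2.1.length = G.length →
      so.foldl (loopStepA G) acc = so.foldl (loopStepB G) acc := by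
  intro so
  induction so with
  | nil => intro acc _; rfl
  | cons i t ih =>
    intro acc hlen
    simp only [List.foldl_cons]
    obtain ⟨h1, h2⟩ := step_eq G acc i hlen
    rw [← h1]
    exact ih _ h2

theorem dfs2_loop_eq (G : List (List Int)) (so : List (List Int)) :
    dfs2_loop G so = dfs2_loop_alt G so := by
  unfold dfs2_loop dfs2_loop_alt
  rw [loop_eq G so _ (by simp)]

-- ===== VERDICT (by name: the statement is the Claim_ definition above) =====
theorem dfs2_loop_spec : Claim_equal_dfs2_loop := by
  intro G so _ _
  exact dfs2_loop_eq G so
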